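-- pv_equiv track=rewrite | github.com/kenryhou2/16891_course_project | single_agent_planner.py | is_valid_motion
-- ===== SOURCE A (Python) =====
-- from itertools import combinations, product
--
-- def is_valid_motion(old_loc, new_loc):
--     ##############################
--     # Task 1.3/1.4: Check if a move from old_loc to new_loc is valid
--     # Check if two agents are in the same location (vertex collision)
--     # TODO
--
--     comb_vert = combinations(new_loc, 2)
--     for i in list(comb_vert):
--         if i[0] == i[1]:
--             return False
--
--     # Check edge collision
--     # TODO
--     edges = list(zip(old_loc, new_loc))
--     comb_edge = combinations(edges, 2)
--     for i in list(comb_edge):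
--         if i[0][0] == i[1][1] and i[0][1] == i[1][0]:
--             return False
--
--     return True
-- ===== SOURCE B (Python) =====
-- def is_valid_motion(old_loc, new_loc):
--     # One-pass hash-set duplicate detection for vertex collisions,
--     # set lookup of the reversed edge for swap collisions.
--     seen = set()
--     for v in new_loc:
--         if v in seen:
--             return False
--         seen.add(v)
--     edges = list(zip(old_loc, new_loc))
--     edge_set = set(edges)
--     for a, b in edges:
--         if a != b and (b, a) in edge_set:
--             return False
--     return True
-- ===== Notes on version B (the rewrite author's own statement) =====
-- stated objective: faster
-- what changed: Replaces both O(n^2) combinations scans by a one-pass seen-set duplicate check for vertex collisions and a single pass over the zipped edges with a set lookup of the reversed edge for swap collisions.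
import Mathlib
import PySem

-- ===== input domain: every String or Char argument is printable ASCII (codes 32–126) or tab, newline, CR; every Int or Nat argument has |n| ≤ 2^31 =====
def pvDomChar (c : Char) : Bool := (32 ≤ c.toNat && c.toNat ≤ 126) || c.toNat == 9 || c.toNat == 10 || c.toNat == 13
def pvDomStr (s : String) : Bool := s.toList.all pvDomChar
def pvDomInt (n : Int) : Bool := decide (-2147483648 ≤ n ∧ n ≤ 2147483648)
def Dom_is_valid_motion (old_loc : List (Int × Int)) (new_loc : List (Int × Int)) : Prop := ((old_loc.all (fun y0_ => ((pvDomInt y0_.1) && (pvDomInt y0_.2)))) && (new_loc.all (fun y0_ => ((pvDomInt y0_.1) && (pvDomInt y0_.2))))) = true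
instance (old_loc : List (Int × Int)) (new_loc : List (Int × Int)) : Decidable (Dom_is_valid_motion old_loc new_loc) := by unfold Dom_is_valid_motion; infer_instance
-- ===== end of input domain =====

-- B replaces A's two O(n^2) combinations scans by a one-pass seen-set vertex check and a
-- reversed-edge set lookup (objective: faster).


-- ===== PORT A =====
-- itertools.combinations(xs, 2), in Python's order
def combPairs {α : Type} (xs : List α) : List (α × α) :=
  match xs with
  | [] => []
  | x :: rest => rest.map (fun y => (x, y)) ++ combPairs rest

def is_valid_motion (old_loc : List (Int × Int)) (new_loc : List (Int × Int)) : Bool :=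
  -- first loop: vertex collision (early return False on first equal pair)
  if (combPairs new_loc).any (fun i => i.1 == i.2) then false
  else
    -- second loop: edge swap collision over combinations of zip(old_loc, new_loc)
    let edges := old_loc.zip new_loc
    if (combPairs edges).any (fun i => i.1.1 == i.2.2 && i.1.2 == i.2.1) then false
    else true

-- ===== PORT B =====
-- Source B's first loop: 'for v in new_loc: if v in seen: return False; seen.add(v)'
def altSeenDup (xs : List (Int × Int)) (seen : PySem.Set (Int × Int)) : Bool :=
  match xs with
  | [] => false
  | v :: rest =>
      if PySem.Set.contains seen v then true
      else altSeenDup rest (PySem.Set.add seen v)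

def is_valid_motion_alt (old_loc : List (Int × Int)) (new_loc : List (Int × Int)) : Bool :=
  if altSeenDup new_loc PySem.Set.empty then false
  else
    let edges := old_loc.zip new_loc
    let edge_set := PySem.Set.ofList edges
    if edges.any (fun e => e.1 != e.2 && PySem.Set.contains edge_set (e.2, e.1)) then false
    else true

-- ===== PRECONDITION & SPEC =====
def Spec_is_valid_motion (old_loc : List (Int × Int)) (new_loc : List (Int × Int)) (out : Bool) : Prop := out = is_valid_motion_alt old_loc new_loc
instance (old_loc : List (Int × Int)) (new_loc : List (Int × Int)) (out : Bool) : Decidable (Spec_is_valid_motion old_loc new_loc out) := by unfold Spec_is_valid_motion; infer_instance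

-- ===== CLAIM (what is proved, stated in full; the proofs are below) =====
def Claim_equal_is_valid_motion : Prop := ∀ (old_loc : List (Int × Int)) (new_loc : List (Int × Int)), Dom_is_valid_motion old_loc new_loc → Spec_is_valid_motion old_loc new_loc (is_valid_motion old_loc new_loc)

-- ===== LEMMAS AND PROOFS =====

-- membership in combPairs projects to membership in the list
theorem mem_of_mem_combPairs {α : Type} {xs : List α} {p : α × α}
    (h : p ∈ combPairs xs) : p.1 ∈ xs ∧ p.2 ∈ xs := by
  induction xs with
  | nil => simp [combPairs] at h
  | cons x rest ih =>
      simp only [combPairs, List.mem_append, List.mem_map] at h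
      rcases h with ⟨y, hy, rfl⟩ | h
      · exact ⟨List.mem_cons_self, List.mem_cons_of_mem _ hy⟩
      · rcases ih h with ⟨h1, h2⟩
        exact ⟨List.mem_cons_of_mem _ h1, List.mem_cons_of_mem _ h2⟩

-- two distinct members of xs occur as a pair of combPairs xs, in one order or the other
theorem combPairs_of_mem_mem {α : Type} {xs : List α} {a b : α}
    (ha : a ∈ xs) (hb : b ∈ xs) (hne : a ≠ b) :
    (a, b) ∈ combPairs xs ∨ (b, a) ∈ combPairs xs := by
  induction xs with
  | nil => simp at ha
  | cons x rest ih =>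
      rcases List.mem_cons.mp ha with rfl | ha'
      · rcases List.mem_cons.mp hb with rfl | hb'
        · exact absurd rfl hne
        · exact Or.inl (by simp [combPairs]; exact Or.inl hb')
      · rcases List.mem_cons.mp hb with rfl | hb'
        · exact Or.inr (by simp [combPairs]; exact Or.inl ha')
        · rcases ih ha' hb' with h | h
          · exact Or.inl (by simp [combPairs, h])
          · exact Or.inr (by simp [combPairs, h])

-- A's vertex scan finds an equal pair exactly when the list has a duplicate
theorem combPairs_any_eq_iff {α : Type} [BEq α] [LawfulBEq α] (xs : List α) :
    (combPairs xs).any (fun i => i.1 == i.2) = true ↔ ¬ xs.Nodup := by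
  induction xs with
  | nil => simp [combPairs]
  | cons x rest ih =>
      simp only [combPairs, List.any_append, Bool.or_eq_true, List.any_map, List.nodup_cons]
      constructor
      · rintro (h | h)
        · rcases List.any_eq_true.mp h with ⟨y, hy, hxy⟩
          simp only [Function.comp, beq_iff_eq] at hxy
          exact fun ⟨hx, _⟩ => hx (hxy ▸ hy)
        · exact fun ⟨_, hnd⟩ => (ih.mp h) hnd
      · intro h
        by_cases hx : x ∈ rest
        · exact Or.inl (List.any_eq_true.mpr ⟨x, hx, by simp [Function.comp]⟩)
        · exact Or.inr (ih.mpr (fun hnd => h ⟨hx, hnd⟩))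

-- B's seen-set loop finds a duplicate exactly when the list has one (or hits the initial set)
theorem altSeenDup_eq_iff (xs : List (Int × Int)) (seen : PySem.Set (Int × Int)) :
    altSeenDup xs seen = true ↔ ¬ xs.Nodup ∨ ∃ v ∈ xs, v ∈ seen := by
  induction xs generalizing seen with
  | nil => simp [altSeenDup]
  | cons v rest ih =>
      simp only [altSeenDup]
      by_cases hv : PySem.Set.contains seen v
      · simp only [hv, if_true, true_iff]
        right
        exact ⟨v, List.mem_cons_self, by simpa [PySem.Set.contains] using hv⟩
      · rw [if_neg hv, ih]
        simp only [List.nodup_cons]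
        constructor
        · rintro (h | ⟨w, hw, hmem⟩)
          · exact Or.inl (fun hc => h hc.2)
          · rcases (by simpa [PySem.Set.mem_add] using hmem : w ∈ seen ∨ w = v) with hws | rfl
            · exact Or.inr ⟨w, List.mem_cons_of_mem _ hw, hws⟩
            · exact Or.inl (fun hc => hc.1 hw)
        · rintro (h | ⟨w, hw, hws⟩)
          · by_cases hvr : v ∈ rest
            · exact Or.inr ⟨v, hvr, by simp [PySem.Set.mem_add]⟩
            · exact Or.inl (fun hnd => h ⟨hvr, hnd⟩)
          · rcases List.mem_cons.mp hw with rfl | hwr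
            · exact absurd (by simpa [PySem.Set.contains] using hws) hv
            · exact Or.inr ⟨w, hwr, by simp [PySem.Set.mem_add, hws]⟩

-- zipped edges inherit Nodup from the new locations
theorem zip_snd_sublist {α β : Type} (l₁ : List α) (l₂ : List β) :
    ((l₁.zip l₂).map Prod.snd).Sublist l₂ := by
  induction l₁ generalizing l₂ with
  | nil => simp
  | cons x r ih =>
      cases l₂ with
      | nil => simp
      | cons y s => simpa using List.Sublist.cons₂ y (ih s)

theorem edges_nodup {old_loc new_loc : List (Int × Int)} (h : new_loc.Nodup) :
    (old_loc.zip new_loc).Nodup :=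
  ((h.sublist (zip_snd_sublist old_loc new_loc)).of_map Prod.snd)

-- the two edge scans agree when the edge list has no duplicates
theorem edge_any_eq (edges : List ((Int × Int) × (Int × Int))) (hnd : edges.Nodup) :
    (combPairs edges).any (fun i => i.1.1 == i.2.2 && i.1.2 == i.2.1) =
    edges.any (fun e => e.1 != e.2 && PySem.Set.contains (PySem.Set.ofList edges) (e.2, e.1)) := by
  rw [Bool.eq_iff_iff]
  simp only [List.any_eq_true, Bool.and_eq_true, beq_iff_eq, bne_iff_ne, ne_eq]
  constructor
  · rintro ⟨⟨e, e'⟩, hmem, h1, h2⟩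
    rcases mem_of_mem_combPairs hmem with ⟨he, he'⟩
    simp only at h1 h2
    have he'eq : e' = (e.2, e.1) := Prod.ext h2.symm h1.symm
    refine ⟨e, he, ?_, ?_⟩
    · intro heq
      have hee : e' = e := by
        obtain ⟨a, b⟩ := e
        simp only at heq
        subst heq
        exact he'eq
      rw [hee] at hmem
      exact (combPairs_any_eq_iff edges).mp
        (List.any_eq_true.mpr ⟨(e, e), hmem, by simp⟩) hnd
    · simpa [PySem.Set.contains, PySem.Set.mem_ofList, he'eq] using (he'eq ▸ he')
  · rintro ⟨e, he, hne, hrev⟩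
    have hrev' : (e.2, e.1) ∈ edges := by
      simpa [PySem.Set.contains, PySem.Set.mem_ofList] using hrev
    have hne' : e ≠ (e.2, e.1) := by
      intro h
      exact hne (congrArg Prod.fst h)
    rcases combPairs_of_mem_mem he hrev' hne' with h | h
    · exact ⟨(e, (e.2, e.1)), h, by simp⟩
    · exact ⟨((e.2, e.1), e), h, by simp⟩

-- ===== VERDICT (by name: the statement is the Claim_ definition above) =====
theorem is_valid_motion_spec : Claim_equal_is_valid_motion := by
  intro old_loc new_loc _
  unfold Spec_is_valid_motion is_valid_motion is_valid_motion_alt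
  by_cases hnd : new_loc.Nodup
  · have hA : (combPairs new_loc).any (fun i => i.1 == i.2) = false := by
      rw [Bool.eq_false_iff]
      intro h; exact (combPairs_any_eq_iff new_loc).mp h hnd
    have hB : altSeenDup new_loc PySem.Set.empty = false := by
      rw [Bool.eq_false_iff]
      intro h
      rcases (altSeenDup_eq_iff new_loc PySem.Set.empty).mp h with h | ⟨v, _, hv⟩
      · exact h hnd
      · simp [PySem.Set.empty] at hv
    rw [hA, hB]
    simp only [Bool.false_eq_true, if_false]
    rw [edge_any_eq (old_loc.zip new_loc) (edges_nodup hnd)]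
  · have hA : (combPairs new_loc).any (fun i => i.1 == i.2) = true :=
      (combPairs_any_eq_iff new_loc).mpr hnd
    have hB : altSeenDup new_loc PySem.Set.empty = true :=
      (altSeenDup_eq_iff new_loc PySem.Set.empty).mpr (Or.inl hnd)
    rw [hA, hB]
    simp
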